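-- pv_equiv track=rewrite | github.com/himanshu231204/run-git | gitpush/ui/interactive.py | _extract_file_diff
-- ===== SOURCE A (Python) =====
-- def _extract_file_diff(full_diff: str, target_file: str) -> str:
--     """Extract diff section for a specific file."""
--     lines = full_diff.split("\n")
--     file_diff_lines = []
--     in_target_file = False
--
--     for line in lines:
--         if line.startswith("diff --git"):
--             # Check if this is our target file
--             in_target_file = target_file in line
--         if in_target_file:
--             file_diff_lines.append(line)
--
--     return "\n".join(file_diff_lines)
-- ===== SOURCE B (Python) =====
-- def _extract_file_diff(full_diff: str, target_file: str) -> str: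
--     """Segment the diff into per-header sections, then keep matching sections."""
--     # Pass 1: segment lines into sections, one per "diff --git" header;
--     # preamble lines (before the first header) are dropped.
--     sections = []
--     current = None
--     for line in full_diff.split("\n"):
--         if line.startswith("diff --git"):
--             if current is not None:
--                 sections.append(current)
--             current = [line]
--         elif current is not None:
--             current.append(line)
--     if current is not None:
--         sections.append(current)
--     # Pass 2: keep sections whose header mentions the target file, concatenate.
--     out = []
--     for sec in sections:
--         if target_file in sec[0]:
--             out.extend(sec)
--     return "\n".join(out)
-- ===== Notes on version B (the rewrite author's own statement) =====
-- stated objective: alternative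
-- what changed: Replaces A's single stateful-flag scan with a segment-then-filter decomposition: first group lines into per-header sections (dropping the preamble), then keep sections whose header contains the target and join them.
import Mathlib
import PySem

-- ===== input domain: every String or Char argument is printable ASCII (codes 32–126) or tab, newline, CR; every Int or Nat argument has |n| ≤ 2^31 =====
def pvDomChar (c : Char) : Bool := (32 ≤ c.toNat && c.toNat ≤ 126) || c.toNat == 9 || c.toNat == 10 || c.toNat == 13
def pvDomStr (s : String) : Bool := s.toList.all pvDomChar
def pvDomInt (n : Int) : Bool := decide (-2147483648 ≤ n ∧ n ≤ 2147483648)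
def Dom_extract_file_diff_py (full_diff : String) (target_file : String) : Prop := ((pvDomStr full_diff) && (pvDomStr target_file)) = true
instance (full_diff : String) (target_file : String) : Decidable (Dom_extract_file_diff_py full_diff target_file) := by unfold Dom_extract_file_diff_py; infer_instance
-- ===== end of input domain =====

-- B replaces A's stateful-flag scan with a segment-then-filter decomposition (same cost; alternative structure).

-- ===== PORT A =====
-- A's loop body: update the 'in_target_file' flag on a header, append the line when the flag is set.
def pvStepA (target_file : String) (st : List String × Bool) (line : String) : List String × Bool :=
  let flag := if PySem.Str.startswith line "diff --git"
              then PySem.Str.isIn target_file line else st.2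
  (if flag then st.1 ++ [line] else st.1, flag)

def extract_file_diff_py (full_diff : String) (target_file : String) : String :=
  -- sep "\n" ≠ "", so split? is always some
  PySem.Str.join "\n"
    ((((PySem.Str.split? full_diff "\n").getD []).foldl (pvStepA target_file) ([], false)).1)

-- ===== PORT B =====
-- B pass-1 loop body: a header closes the open section and opens a new one;
-- other lines go into the open section, or are dropped (preamble) when none is open.
def pvStepB (st : List (List String) × Option (List String)) (line : String) :
    List (List String) × Option (List String) :=
  if PySem.Str.startswith line "diff --git" then
    (match st.2 with
     | some cur => st.1 ++ [cur]
     | none => st.1, some [line])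
  else
    match st.2 with
    | some cur => (st.1, some (cur ++ [line]))
    | none => st

def pvSegment (lines : List String) : List (List String) :=
  match lines.foldl pvStepB ([], none) with
  | (secs, some cur) => secs ++ [cur]
  | (secs, none) => secs

-- B pass-2 loop body: keep a section iff its header (first line) mentions the target.
def pvKeepStep (target_file : String) (out : List String) (sec : List String) : List String :=
  match sec with
  | [] => out   -- unreachable: every section starts with its header
  | h :: _ => if PySem.Str.isIn target_file h then out ++ sec else out

def extract_file_diff_py_alt (full_diff : String) (target_file : String) : String :=
  PySem.Str.join "\n"
    ((pvSegment ((PySem.Str.split? full_diff "\n").getD [])).foldl (pvKeepStep target_file) [])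

-- ===== PRECONDITION & SPEC =====
def Spec_extract_file_diff_py (full_diff : String) (target_file : String) (out : String) : Prop := out = extract_file_diff_py_alt full_diff target_file
instance (full_diff : String) (target_file : String) (out : String) : Decidable (Spec_extract_file_diff_py full_diff target_file out) := by unfold Spec_extract_file_diff_py; infer_instance

-- ===== CLAIM (what is proved, stated in full; the proofs are below) =====
def Claim_equal_extract_file_diff_py : Prop := ∀ (full_diff : String) (target_file : String), Dom_extract_file_diff_py full_diff target_file → Spec_extract_file_diff_py full_diff target_file (extract_file_diff_py full_diff target_file)

-- ===== LEMMAS AND PROOFS =====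

-- B's finalization: append the open section, if any.
def pvFinish (secs : List (List String)) (cur : Option (List String)) : List (List String) :=
  match cur with
  | some c => secs ++ [c]
  | none => secs

-- concatenation of the kept sections (B's pass 2, as a function)
def pvKeepFlat (tf : String) (secs : List (List String)) : List String :=
  secs.flatMap (fun sec =>
    match sec with
    | [] => []
    | h :: _ => if PySem.Str.isIn tf h then sec else [])

-- A's flag, read off B's open section
def pvCurKeep (tf : String) : Option (List String) → Bool
  | none => false
  | some [] => false
  | some (h :: _) => PySem.Str.isIn tf h

lemma pvKeepFlat_append (tf : String) (s t : List (List String)) :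
    pvKeepFlat tf (s ++ t) = pvKeepFlat tf s ++ pvKeepFlat tf t := by
  simp [pvKeepFlat]

lemma pv_pass2 (tf : String) (secs : List (List String)) (out : List String) :
    secs.foldl (pvKeepStep tf) out = out ++ pvKeepFlat tf secs := by
  induction secs generalizing out with
  | nil => simp [pvKeepFlat]
  | cons s ss ih =>
    rw [List.foldl_cons, ih]
    cases s with
    | nil => simp [pvKeepStep, pvKeepFlat, List.flatMap_cons]
    | cons h t =>
      simp only [pvKeepStep, pvKeepFlat, List.flatMap_cons]
      split_ifs <;> simp

lemma pvStepA_header (tf l : String) (secs : List (List String)) (cur : Option (List String))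
    (hs : PySem.Str.startswith l "diff --git" = true) :
    pvStepA tf (pvKeepFlat tf (pvFinish secs cur), pvCurKeep tf cur) l
      = (pvKeepFlat tf (pvFinish (pvFinish secs cur) (some [l])), pvCurKeep tf (some [l])) := by
  simp at hs
  simp only [pvStepA, pvFinish, pvKeepFlat_append, pvCurKeep]
  simp [hs]
  split_ifs <;> simp_all [pvKeepFlat]

lemma pvStepB_header (l : String) (secs : List (List String)) (cur : Option (List String))
    (hs : PySem.Str.startswith l "diff --git" = true) :
    pvStepB (secs, cur) l = (pvFinish secs cur, some [l]) := by
  simp at hs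
  cases cur <;> simp [pvStepB, pvFinish, hs]

lemma pvStepA_plain_none (tf l : String) (secs : List (List String))
    (hs : ¬ PySem.Str.startswith l "diff --git" = true) :
    pvStepA tf (pvKeepFlat tf (pvFinish secs none), pvCurKeep tf none) l
      = (pvKeepFlat tf (pvFinish secs none), pvCurKeep tf none) := by
  simp at hs
  simp [pvStepA, hs, pvCurKeep]

lemma pvStepB_plain_none (l : String) (secs : List (List String))
    (hs : ¬ PySem.Str.startswith l "diff --git" = true) :
    pvStepB (secs, none) l = (secs, none) := by
  simp at hs
  simp [pvStepB, hs]

lemma pvStepA_plain_some (tf l : String) (secs : List (List String)) (h : String) (t : List String)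
    (hs : ¬ PySem.Str.startswith l "diff --git" = true) :
    pvStepA tf (pvKeepFlat tf (pvFinish secs (some (h :: t))), pvCurKeep tf (some (h :: t))) l
      = (pvKeepFlat tf (pvFinish secs (some (h :: t ++ [l]))), pvCurKeep tf (some (h :: t ++ [l]))) := by
  simp at hs
  simp only [pvStepA, pvFinish, pvKeepFlat_append, pvCurKeep]
  simp [hs]
  split_ifs <;> simp_all [pvKeepFlat]

lemma pvStepB_plain_some (l : String) (secs : List (List String)) (c : List String)
    (hs : ¬ PySem.Str.startswith l "diff --git" = true) :
    pvStepB (secs, some c) l = (secs, some (c ++ [l])) := by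
  simp at hs
  simp [pvStepB, hs]

-- Loop invariant: A's (acc, flag) is determined by B's (finished sections, open section).
lemma pv_inv (tf : String) (lines : List String) :
    ∀ (secs : List (List String)) (cur : Option (List String)),
    (∀ c, cur = some c → c ≠ []) →
    lines.foldl (pvStepA tf) (pvKeepFlat tf (pvFinish secs cur), pvCurKeep tf cur)
      = (pvKeepFlat tf (pvFinish (lines.foldl pvStepB (secs, cur)).1
                                 (lines.foldl pvStepB (secs, cur)).2),
         pvCurKeep tf (lines.foldl pvStepB (secs, cur)).2) := by
  induction lines with
  | nil => intro secs cur _; rfl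
  | cons l ls ih =>
    intro secs cur hne
    rw [List.foldl_cons, List.foldl_cons]
    by_cases hs : PySem.Str.startswith l "diff --git" = true
    · rw [pvStepA_header tf l secs cur hs, pvStepB_header l secs cur hs]
      exact ih (pvFinish secs cur) (some [l]) (by intro c hc; cases hc; simp)
    · cases cur with
      | none =>
        rw [pvStepA_plain_none tf l secs hs, pvStepB_plain_none l secs hs]
        exact ih secs none (by intro c hc; cases hc)
      | some c =>
        obtain ⟨h, t, rfl⟩ : ∃ h t, c = h :: t := by
          cases c with
          | nil => exact absurd rfl (hne [] rfl)
          | cons h t => exact ⟨h, t, rfl⟩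
        rw [pvStepA_plain_some tf l secs h t hs, pvStepB_plain_some l secs (h :: t) hs]
        exact ih secs (some (h :: t ++ [l])) (by intro c hc; cases hc; simp)

lemma pvSegment_eq_finish (lines : List String) :
    pvSegment lines = pvFinish (lines.foldl pvStepB ([], none)).1
                               (lines.foldl pvStepB ([], none)).2 := by
  rcases h : lines.foldl pvStepB ([], none) with ⟨secs, _ | c⟩ <;> simp [pvSegment, pvFinish, h]

-- ===== VERDICT (by name: the statement is the Claim_ definition above) =====
theorem extract_file_diff_py_spec : Claim_equal_extract_file_diff_py := by
  intro full_diff target_file _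
  unfold Spec_extract_file_diff_py extract_file_diff_py extract_file_diff_py_alt
  rw [pv_pass2, pvSegment_eq_finish, List.nil_append]
  have h0 : (([], false) : List String × Bool)
      = (pvKeepFlat target_file (pvFinish [] none), pvCurKeep target_file none) := rfl
  rw [h0, congrArg Prod.fst
    (pv_inv target_file ((PySem.Str.split? full_diff "\n").getD []) [] none
      (by intro c hc; cases hc))]
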